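-- pv_equiv track=rewrite | github.com/mueno/web-app-factory | web_app_factory/_env_checker.py | format_env_report
-- ===== SOURCE A (Python) =====
-- from typing import Any
--
-- def format_env_report(
--     statuses: list[dict[str, Any]],
--     install_result: str | None = None,
-- ) -> str:
--     """Render a markdown environment status report.
--
--     Produces a table with columns: Tool, Status, Version Found, Required, Install Command.
--     Appends "Environment is ready" if all statuses are "present", otherwise
--     includes instructions to use waf_check_env with execute_install.
--     Appends any per-tool notes below the table.
--     Optionally appends an install_result section.
--
--     Args:
--         statuses: List of ToolStatus dicts from check_env().
--         install_result: Optional output from a prior install_tool() call.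
--
--     Returns:
--         Formatted markdown string.
--     """
--     lines: list[str] = []
--
--     # Table header
--     lines.append("| Tool | Status | Version Found | Required | Install Command |")
--     lines.append("|------|--------|---------------|----------|-----------------|")
--
--     notes: list[str] = []
--
--     for s in statuses:
--         tool = s.get("tool", "")
--         status = s.get("status", "")
--         version_found = s.get("version_found") or "—"
--         version_required = s.get("version_required") or "—"
--         install_command = s.get("install_command") or "—"
--         note = s.get("note")
--
--         # Truncate long install commands in table (full command shown in notes)
--         display_install = install_command
--         if len(display_install) > 50:
--             display_install = display_install[:47] + "..."
--
--         # Status icon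
--         if status == "present":
--             status_display = "OK"
--         elif status == "present_unauth":
--             status_display = "WARN (unauthenticated)"
--         elif status == "outdated":
--             status_display = "OUTDATED"
--         else:
--             status_display = "MISSING"
--
--         lines.append(
--             f"| {tool} | {status_display} | {version_found} | {version_required} | {display_install} |"
--         )
--
--         if note:
--             notes.append(f"**{tool}**: {note}")
--
--     lines.append("")
--
--     # Summary
--     all_ok = all(s.get("status") == "present" for s in statuses)
--     if all_ok:
--         lines.append("Environment is ready. All required tools are installed and configured.")
--     else:
--         has_missing = any(s.get("status") in ("missing", "outdated") for s in statuses)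
--         if has_missing:
--             lines.append(
--                 "Some tools are missing or outdated. "
--                 "Use `waf_check_env` with `execute_install=true` to install them automatically, "
--                 "or follow the install commands above."
--             )
--         else:
--             # present_unauth only
--             lines.append(
--                 "Tools are installed but authentication may be required. "
--                 "See notes below."
--             )
--
--     # Notes section
--     if notes:
--         lines.append("")
--         lines.append("### Notes")
--         for note in notes:
--             lines.append(f"- {note}")
--
--     # Install result section
--     if install_result is not None:
--         lines.append("")
--         lines.append("### Install Result")
--         lines.append(install_result)
--
--     return "\n".join(lines)
-- ===== SOURCE B (Python) =====
-- _LABELS = {"present": "OK", "present_unauth": "WARN (unauthenticated)", "outdated": "OUTDATED"}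
--
--
-- def format_env_report(statuses, install_result=None):
--     """Build the report back-to-front by direct string concatenation: one reversed
--     pass accumulates the table body, the notes section and the summary flags,
--     with no intermediate list of lines and no join at the end."""
--     rows = ""
--     notes = ""
--     all_present = True
--     has_issue = False
--     for s in reversed(statuses):
--         status = s.get("status")
--         tool = s.get("tool", "")
--         found = s.get("version_found") or "—"
--         required = s.get("version_required") or "—"
--         install = s.get("install_command") or "—"
--         if len(install) > 50:
--             install = install[:47] + "..."
--         rows = (
--             f"\n| {tool} | {_LABELS.get(status, 'MISSING')} | {found} | {required} | {install} |"
--             + rows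
--         )
--         note = s.get("note")
--         if note:
--             notes = f"\n- **{tool}**: {note}" + notes
--         all_present = status == "present" and all_present
--         has_issue = status in ("missing", "outdated") or has_issue
--     if all_present:
--         summary = "Environment is ready. All required tools are installed and configured."
--     elif has_issue:
--         summary = (
--             "Some tools are missing or outdated. "
--             "Use `waf_check_env` with `execute_install=true` to install them automatically, "
--             "or follow the install commands above."
--         )
--     else:
--         summary = (
--             "Tools are installed but authentication may be required. "
--             "See notes below."
--         )
--     report = (
--         "| Tool | Status | Version Found | Required | Install Command |\n"
--         "|------|--------|---------------|----------|-----------------|"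
--         + rows + "\n\n" + summary
--     )
--     if notes:
--         report += "\n\n### Notes" + notes
--     if install_result is not None:
--         report += "\n\n### Install Result\n" + install_result
--     return report
-- ===== Notes on version B (the rewrite author's own statement) =====
-- stated objective: alternative
-- what changed: B builds the report back-to-front in a single reversed pass that accumulates the table body and the notes section directly as strings by prepending (no list of lines, no final join), and keeps the two summary flags in the same pass instead of A's separate all()/any() rescans.
import Mathlib
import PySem

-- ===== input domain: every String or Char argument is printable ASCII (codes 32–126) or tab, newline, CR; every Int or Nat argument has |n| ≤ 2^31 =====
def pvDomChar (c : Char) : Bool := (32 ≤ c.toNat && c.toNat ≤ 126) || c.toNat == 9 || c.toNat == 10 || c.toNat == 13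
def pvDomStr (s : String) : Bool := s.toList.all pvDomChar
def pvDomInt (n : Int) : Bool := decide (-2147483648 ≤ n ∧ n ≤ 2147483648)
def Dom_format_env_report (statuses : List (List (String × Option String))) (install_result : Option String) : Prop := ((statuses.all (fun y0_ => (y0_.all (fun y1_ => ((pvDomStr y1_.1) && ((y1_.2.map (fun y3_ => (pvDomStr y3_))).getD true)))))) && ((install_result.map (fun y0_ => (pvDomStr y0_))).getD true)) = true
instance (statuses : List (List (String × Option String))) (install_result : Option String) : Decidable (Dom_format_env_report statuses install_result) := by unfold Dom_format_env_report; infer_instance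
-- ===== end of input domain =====

-- B builds the report back-to-front: one reversed pass accumulates the table body and the
-- notes section directly as strings by prepending, with the summary flags kept in the same
-- pass — no list of lines and no final join (objective: alternative decomposition, same cost).

-- shared primitives for the Python surface (dict.get / `x or "—"` / implicit str())
-- s.get(k): first match in insertion order (none = key absent)
def pvGet (s : List (String × Option String)) (k : String) : Option (Option String) :=
  (PySem.Dict.mk s).get? k
-- `v or "—"` on a str|None value
def pvOrDash : Option String → String
  | some t => if t = "" then "—" else t
  | none => "—"
-- str(x) on a str|None value inserted in an f-string
def pvStr : Option String → String
  | some t => t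
  | none => "None"

-- ===== PORT A =====
-- body of A's `for s in statuses` loop: state = (lines, notes)
def pvAstep (acc : List String × List String) (s : List (String × Option String)) :
    List String × List String :=
  let tool := (pvGet s "tool").getD (some "")
  let status := (pvGet s "status").getD (some "")
  let version_found := pvOrDash ((pvGet s "version_found").getD none)
  let version_required := pvOrDash ((pvGet s "version_required").getD none)
  let install_command := pvOrDash ((pvGet s "install_command").getD none)
  let note := (pvGet s "note").getD none
  let display_install :=
    if PySem.Str.len install_command > 50
    then PySem.Str.slice install_command none (some 47) ++ "..."
    else install_command
  let status_display :=
    if status == some "present" then "OK"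
    else if status == some "present_unauth" then "WARN (unauthenticated)"
    else if status == some "outdated" then "OUTDATED"
    else "MISSING"
  let row := "| " ++ pvStr tool ++ " | " ++ status_display ++ " | " ++ version_found ++
    " | " ++ version_required ++ " | " ++ display_install ++ " |"
  (acc.1 ++ [row],
   match note with
   | some n => if n = "" then acc.2 else acc.2 ++ ["**" ++ pvStr tool ++ "**: " ++ n]
   | none => acc.2)

def format_env_report (statuses : List (List (String × Option String))) (install_result : Option String) : String :=
  let header : List String :=
    ["| Tool | Status | Version Found | Required | Install Command |",
     "|------|--------|---------------|----------|-----------------|"]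
  let fold := statuses.foldl pvAstep (header, ([] : List String))
  let lines := fold.1 ++ [""]
  let all_ok := statuses.all (fun s => (pvGet s "status").getD none == some "present")
  let lines :=
    if all_ok then
      lines ++ ["Environment is ready. All required tools are installed and configured."]
    else if statuses.any (fun s =>
        ((pvGet s "status").getD none == some "missing") ||
        ((pvGet s "status").getD none == some "outdated")) then
      lines ++ ["Some tools are missing or outdated. Use `waf_check_env` with `execute_install=true` to install them automatically, or follow the install commands above."]
    else
      lines ++ ["Tools are installed but authentication may be required. See notes below."]
  let lines := if fold.2.isEmpty then lines
    else lines ++ ["", "### Notes"] ++ fold.2.map (fun n => "- " ++ n)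
  let lines :=
    match install_result with
    | some r => lines ++ ["", "### Install Result", r]
    | none => lines
  PySem.Str.join "\n" lines

-- ===== PORT B =====
-- _LABELS; keys wrapped in `some`: a Python str key never equals None
def pvLabels : PySem.Dict (Option String) String :=
  PySem.Dict.mk [(some "present", "OK"), (some "present_unauth", "WARN (unauthenticated)"),
    (some "outdated", "OUTDATED")]

-- body of B's `for s in reversed(statuses)` loop: state = (rows, notes, all_present, has_issue)
def pvBstep (acc : String × String × Bool × Bool) (s : List (String × Option String)) :
    String × String × Bool × Bool :=
  let status := (pvGet s "status").getD none
  let tool := (pvGet s "tool").getD (some "")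
  let found := pvOrDash ((pvGet s "version_found").getD none)
  let required := pvOrDash ((pvGet s "version_required").getD none)
  let install0 := pvOrDash ((pvGet s "install_command").getD none)
  let install :=
    if PySem.Str.len install0 > 50
    then PySem.Str.slice install0 none (some 47) ++ "..."
    else install0
  let rows := "\n| " ++ pvStr tool ++ " | " ++ pvLabels.getD status "MISSING" ++ " | " ++
    found ++ " | " ++ required ++ " | " ++ install ++ " |" ++ acc.1
  let note := (pvGet s "note").getD none
  let notes :=
    match note with
    | some n => if n = "" then acc.2.1 else "\n- **" ++ pvStr tool ++ "**: " ++ n ++ acc.2.1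
    | none => acc.2.1
  (rows, notes,
   (status == some "present") && acc.2.2.1,
   ((status == some "missing") || (status == some "outdated")) || acc.2.2.2)

def format_env_report_alt (statuses : List (List (String × Option String))) (install_result : Option String) : String :=
  let st := statuses.reverse.foldl pvBstep ("", "", true, false)
  let summary :=
    if st.2.2.1 then "Environment is ready. All required tools are installed and configured."
    else if st.2.2.2 then "Some tools are missing or outdated. Use `waf_check_env` with `execute_install=true` to install them automatically, or follow the install commands above."
    else "Tools are installed but authentication may be required. See notes below."
  let report := "| Tool | Status | Version Found | Required | Install Command |\n|------|--------|---------------|----------|-----------------|"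
    ++ st.1 ++ "\n\n" ++ summary
  let report := if st.2.1 = "" then report else report ++ "\n\n### Notes" ++ st.2.1
  match install_result with
  | some r => report ++ "\n\n### Install Result\n" ++ r
  | none => report

-- ===== PRECONDITION & SPEC =====
def Spec_format_env_report (statuses : List (List (String × Option String))) (install_result : Option String) (out : String) : Prop := out = format_env_report_alt statuses install_result
instance (statuses : List (List (String × Option String))) (install_result : Option String) (out : String) : Decidable (Spec_format_env_report statuses install_result out) := by unfold Spec_format_env_report; infer_instance

-- ===== CLAIM (what is proved, stated in full; the proofs are below) =====
def Claim_equal_format_env_report : Prop := ∀ (statuses : List (List (String × Option String))) (install_result : Option String), Dom_format_env_report statuses install_result → Spec_format_env_report statuses install_result (format_env_report statuses install_result)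

-- ===== LEMMAS AND PROOFS =====

-- proof-side per-status pieces (A's shapes)
def pvRow (s : List (String × Option String)) : String :=
  let tool := (pvGet s "tool").getD (some "")
  let status := (pvGet s "status").getD (some "")
  let install0 := pvOrDash ((pvGet s "install_command").getD none)
  "| " ++ pvStr tool ++ " | " ++
    (if status == some "present" then "OK"
     else if status == some "present_unauth" then "WARN (unauthenticated)"
     else if status == some "outdated" then "OUTDATED" else "MISSING") ++ " | " ++
    pvOrDash ((pvGet s "version_found").getD none) ++ " | " ++
    pvOrDash ((pvGet s "version_required").getD none) ++ " | " ++
    (if PySem.Str.len install0 > 50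
     then PySem.Str.slice install0 none (some 47) ++ "..." else install0) ++ " |"

def pvNoteOpt (s : List (String × Option String)) : Option String :=
  match (pvGet s "note").getD none with
  | some n => if n = "" then none
    else some ("**" ++ pvStr ((pvGet s "tool").getD (some "")) ++ "**: " ++ n)
  | none => none

def pvNotesList (l : List (List (String × Option String))) : List String :=
  l.foldr (fun s acc => (pvNoteOpt s).toList ++ acc) []

-- joinTail l = the "\n"-prefixed concatenation of l
def pvJoinTail (l : List String) : String :=
  l.foldr (fun x acc => "\n" ++ x ++ acc) ""

-- B's label dict agrees with A's if-chain
theorem pvStatusLabel_eq (st : Option String) :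
    pvLabels.getD st "MISSING" =
      (if st == some "present" then "OK"
       else if st == some "present_unauth" then "WARN (unauthenticated)"
       else if st == some "outdated" then "OUTDATED" else "MISSING") := by
  unfold pvLabels
  simp only [PySem.Dict.getD, PySem.Dict.get?_mk_cons]
  rcases st with _ | t
  · simp [PySem.Dict.get?]
  · by_cases h1 : t = "present"
    · subst h1; simp
    · by_cases h2 : t = "present_unauth"
      · subst h2; simp
      · by_cases h3 : t = "outdated"
        · subst h3; simp
        · rw [if_neg (by simpa using Ne.symm h1), if_neg (by simpa using Ne.symm h2),
            if_neg (by simpa using Ne.symm h3)]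
          simp [PySem.Dict.get?, h1, h2, h3]

-- A's status read with default "" gives the same comparisons as the read with default None
theorem pvStatusDefault (s : List (String × Option String)) (t : String) (ht : t ≠ "") :
    ((pvGet s "status").getD (some "") == some t) = ((pvGet s "status").getD none == some t) := by
  rcases h : pvGet s "status" with _ | v
  · simp [ht]
  · simp

-- A's loop body adds exactly pvRow and the pvNoteOpt entry
theorem pvAstep_eq (acc : List String × List String) (s : List (String × Option String)) :
    pvAstep acc s = (acc.1 ++ [pvRow s], acc.2 ++ (pvNoteOpt s).toList) := by
  unfold pvAstep pvRow pvNoteOpt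
  rcases hn : (pvGet s "note").getD none with _ | n
  · simp
  · by_cases he : n = "" <;> simp [he]

-- A's fold in canonical form
theorem pvFoldA (l : List (List (String × Option String))) (L N : List String) :
    l.foldl pvAstep (L, N) = (L ++ l.map pvRow, N ++ pvNotesList l) := by
  induction l generalizing L N with
  | nil => simp [pvNotesList]
  | cons s l ih => simp [List.foldl_cons, pvAstep_eq, ih, pvNotesList]

-- B's loop body in terms of pvRow / pvNoteOpt
theorem pvBstep_eq (acc : String × String × Bool × Bool) (s : List (String × Option String)) :
    pvBstep acc s =
      ("\n" ++ pvRow s ++ acc.1,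
       (match pvNoteOpt s with
        | some n => "\n- " ++ n ++ acc.2.1
        | none => acc.2.1),
       (((pvGet s "status").getD none == some "present") && acc.2.2.1),
       ((((pvGet s "status").getD none == some "missing") ||
         ((pvGet s "status").getD none == some "outdated")) || acc.2.2.2)) := by
  unfold pvBstep pvRow pvNoteOpt
  simp only [pvStatusLabel_eq, pvStatusDefault s "present" (by decide),
    pvStatusDefault s "present_unauth" (by decide), pvStatusDefault s "outdated" (by decide)]
  rcases hn : (pvGet s "note").getD none with _ | n
  · simp [String.append_assoc]
    rfl
  · by_cases he : n = "" <;> simp [he, String.append_assoc] <;> constructor <;> rfl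

-- B's reversed fold in canonical form
theorem pvJoinTail_append (l1 l2 : List String) :
    pvJoinTail (l1 ++ l2) = pvJoinTail l1 ++ pvJoinTail l2 := by
  induction l1 with
  | nil => simp [pvJoinTail]
  | cons x l ih =>
      show "\n" ++ (x ++ pvJoinTail (l ++ l2)) = ("\n" ++ (x ++ pvJoinTail l)) ++ pvJoinTail l2
      rw [ih]
      simp [String.append_assoc]

theorem pvFoldB (l : List (List (String × Option String))) :
    l.reverse.foldl pvBstep ("", "", true, false) =
      (pvJoinTail (l.map pvRow),
       pvJoinTail ((pvNotesList l).map (fun n => "- " ++ n)),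
       l.all (fun s => (pvGet s "status").getD none == some "present"),
       l.any (fun s => ((pvGet s "status").getD none == some "missing") ||
         ((pvGet s "status").getD none == some "outdated"))) := by
  rw [List.foldl_reverse]
  induction l with
  | nil => simp [pvJoinTail, pvNotesList]
  | cons s l ih =>
      rw [List.foldr_cons, pvBstep_eq, ih]
      have hnl : pvNotesList (s :: l) = (pvNoteOpt s).toList ++ pvNotesList l := rfl
      simp only [hnl, List.map_cons, List.map_append, pvJoinTail_append, List.all_cons,
        List.any_cons]
      have hjt : ∀ x : String, pvJoinTail [x] = "\n" ++ x := by
        intro x; simp [pvJoinTail]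
      rcases hn : pvNoteOpt s with _ | n
      · simp [pvJoinTail]
      · simp only [Option.toList_some, List.map_cons, List.map_nil]
        have hd : ("\n- " : String) = "\n" ++ "- " := rfl
        simp only [pvJoinTail, List.foldr_cons, List.foldr_nil, String.empty_append,
          String.append_assoc]
        rw [hd, String.append_assoc]

-- sep.join over a nonempty list, peeled once
theorem pvJoin_eq (a : String) (l : List String) :
    PySem.Str.join "\n" (a :: l) = a ++ pvJoinTail l := by
  induction l generalizing a with
  | nil =>
      apply String.toList_inj.mp
      simp [PySem.Str.toList_join, PySem.Chars.join_singleton, pvJoinTail]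
  | cons b l ih =>
      apply String.toList_inj.mp
      have hb := congrArg String.toList (ih b)
      simp only [PySem.Str.toList_join, List.map_cons] at hb ⊢
      rw [PySem.Chars.join_cons_cons]
      simp only [pvJoinTail, List.foldr_cons] at hb ⊢
      rw [show ("\n" : String).toList = ['\n'] from rfl, String.toList_append] at hb
      simp [hb]

theorem pvJoinTail_cons (x : String) (l : List String) :
    pvJoinTail (x :: l) = "\n" ++ (x ++ pvJoinTail l) := rfl

theorem pvJoinTail_nil : pvJoinTail [] = "" := rfl

-- a "\n"-prefixed concatenation is empty only for the empty list
theorem pvJoinTail_eq_empty_iff (l : List String) : pvJoinTail l = "" ↔ l = [] := by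
  cases l with
  | nil => simp [pvJoinTail]
  | cons x l =>
      simp only [pvJoinTail, List.foldr_cons]
      constructor
      · intro h
        have := congrArg String.toList h
        simp at this
      · intro h; cases h

-- ===== VERDICT (by name: the statement is the Claim_ definition above) =====
set_option maxRecDepth 40000 in
theorem format_env_report_spec : Claim_equal_format_env_report := by
  intro statuses install_result _
  unfold Spec_format_env_report format_env_report format_env_report_alt
  simp only [pvFoldA, pvFoldB, List.nil_append]
  set l := statuses with hl
  set rows := l.map pvRow with hrows
  set notes := pvNotesList l with hnotes
  set allp := l.all (fun s => (pvGet s "status").getD none == some "present") with hallp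
  set issue := l.any (fun s => ((pvGet s "status").getD none == some "missing") ||
    ((pvGet s "status").getD none == some "outdated")) with hissue
  have hnn : (pvJoinTail (notes.map (fun n => "- " ++ n)) = "") ↔ notes.isEmpty = true := by
    rw [pvJoinTail_eq_empty_iff, List.map_eq_nil_iff, List.isEmpty_iff]
  have e1 : ("| Tool | Status | Version Found | Required | Install Command |\n|------|--------|---------------|----------|-----------------|" : String)
      = "| Tool | Status | Version Found | Required | Install Command |" ++
        ("\n" ++ "|------|--------|---------------|----------|-----------------|") := by decide
  have e2 : ("\n\n" : String) = "\n" ++ "\n" := by decide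
  have e3 : ("\n\n### Notes" : String) = "\n" ++ ("\n" ++ "### Notes") := by decide
  have e4 : ("\n\n### Install Result\n" : String) = "\n" ++ ("\n" ++ ("### Install Result" ++ "\n")) := by decide
  rcases install_result with _ | r <;>
    by_cases hne : notes.isEmpty = true <;>
    simp only [hnn, hne, if_true, if_false, Bool.false_eq_true] <;>
    split_ifs <;>
      (simp only [List.append_assoc, List.cons_append, List.nil_append]
       rw [pvJoin_eq, e1]
       simp only [pvJoinTail_cons, pvJoinTail_append, pvJoinTail_nil]
       rw [e2]
       try rw [e3]
       try rw [e4]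
       simp only [String.append_assoc, String.empty_append, String.append_empty])
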